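-- pv_equiv track=rewrite | github.com/innerview-silenttwin/crypto-signal-pro | backend/signal_performance.py | _compute_chip_day
-- ===== SOURCE A (Python) =====
-- from typing import Dict, Optional
--
-- def _compute_chip_day(inst_data: Dict[str, dict], date_str: str) -> dict:
--     """計算某日的籌碼面信號"""
--     if not inst_data:
--         return {"foreign_consec_buy": 0, "trust_consec_buy": 0,
--                 "foreign_net": 0, "trust_net": 0}
--
--     target = date_str.replace("-", "")
--     sorted_dates = sorted([d for d in inst_data.keys() if d <= target])
--     if not sorted_dates:
--         return {"foreign_consec_buy": 0, "trust_consec_buy": 0,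
--                 "foreign_net": 0, "trust_net": 0}
--
--     # 外資連買天數
--     foreign_consec = 0
--     for d in reversed(sorted_dates):
--         if inst_data[d].get("foreign_net", 0) > 0:
--             foreign_consec += 1
--         else:
--             break
--
--     # 投信連買天數
--     trust_consec = 0
--     for d in reversed(sorted_dates):
--         if inst_data[d].get("trust_net", 0) > 0:
--             trust_consec += 1
--         else:
--             break
--
--     today_data = inst_data.get(target, {})
--     return {
--         "foreign_consec_buy": foreign_consec,
--         "trust_consec_buy": trust_consec,
--         "foreign_net": today_data.get("foreign_net", 0),
--         "trust_net": today_data.get("trust_net", 0),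
--     }
-- ===== SOURCE B (Python) =====
-- def _compute_chip_day(inst_data, date_str):
--     """Linear two-pass version: find the latest non-buying date ("blocker") per
--     institution, then count dates above it — no sort."""
--     target = date_str.replace("-", "")
--     bf = bt = None  # latest date <= target with non-positive foreign / trust net
--     for d, rec in inst_data.items():
--         if d > target:
--             continue
--         if rec.get("foreign_net", 0) <= 0 and (bf is None or d > bf):
--             bf = d
--         if rec.get("trust_net", 0) <= 0 and (bt is None or d > bt):
--             bt = d
--     fc = tc = 0
--     for d in inst_data:
--         if d > target:
--             continue
--         if bf is None or d > bf:
--             fc += 1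
--         if bt is None or d > bt:
--             tc += 1
--     today = inst_data.get(target, {})
--     return {
--         "foreign_consec_buy": fc,
--         "trust_consec_buy": tc,
--         "foreign_net": today.get("foreign_net", 0),
--         "trust_net": today.get("trust_net", 0),
--     }
-- ===== Notes on version B (the rewrite author's own statement) =====
-- stated objective: alternative
-- what changed: Replaces sort+reversed-takewhile with two linear passes: one pass finds, per institution, the latest date <= target whose net is non-positive (the streak 'blocker'), a second pass counts dates above that blocker; no sort is performed.
import Mathlib
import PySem

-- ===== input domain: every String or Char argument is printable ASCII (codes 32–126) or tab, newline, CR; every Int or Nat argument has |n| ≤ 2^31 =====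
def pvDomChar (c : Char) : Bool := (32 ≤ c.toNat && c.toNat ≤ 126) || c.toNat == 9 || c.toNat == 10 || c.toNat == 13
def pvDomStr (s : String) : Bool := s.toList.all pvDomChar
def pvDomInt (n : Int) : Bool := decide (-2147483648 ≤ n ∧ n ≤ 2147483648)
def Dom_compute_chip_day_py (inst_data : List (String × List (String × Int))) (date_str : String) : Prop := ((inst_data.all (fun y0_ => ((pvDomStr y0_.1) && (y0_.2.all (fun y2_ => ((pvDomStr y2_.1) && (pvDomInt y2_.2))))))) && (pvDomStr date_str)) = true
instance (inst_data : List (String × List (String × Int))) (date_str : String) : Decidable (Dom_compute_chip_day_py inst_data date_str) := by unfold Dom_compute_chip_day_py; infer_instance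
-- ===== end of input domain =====

-- B replaces A's sort + reversed take-while loops by two linear passes (latest
-- "blocker" date per institution, then a counting pass); same return value, no sort.

-- ===== PORT A =====
-- rec.get(field, 0) on an inner dict
def pvRecNet (rec : List (String × Int)) (field : String) : Int :=
  PySem.Dict.getD (PySem.Dict.ofList rec) field 0

-- the 'for d in reversed(sorted_dates): if …>0: c += 1 else: break' loop
def pvConsec (p : String → Bool) : List String → Int
  | [] => 0
  | d :: rest => if p d then 1 + pvConsec p rest else 0

def pvChipDefault : List (String × Int) :=
  [("foreign_consec_buy", 0), ("trust_consec_buy", 0), ("foreign_net", 0), ("trust_net", 0)]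

def compute_chip_day_py (inst_data : List (String × List (String × Int))) (date_str : String) : List (String × Int) :=
  if inst_data = [] then pvChipDefault
  else
    let D := PySem.Dict.ofList inst_data
    let target := PySem.Str.replace date_str "-" ""
    let sorted_dates := PySem.List.sorted ((PySem.Dict.keys D).filter (fun d => decide (d ≤ target))) (fun x => x) false
    if sorted_dates = [] then pvChipDefault
    else
      let foreign_consec := pvConsec (fun d => decide (0 < pvRecNet (PySem.Dict.getD D d []) "foreign_net")) sorted_dates.reverse
      let trust_consec := pvConsec (fun d => decide (0 < pvRecNet (PySem.Dict.getD D d []) "trust_net")) sorted_dates.reverse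
      let today := PySem.Dict.getD D target []
      [("foreign_consec_buy", foreign_consec), ("trust_consec_buy", trust_consec),
       ("foreign_net", pvRecNet today "foreign_net"), ("trust_net", pvRecNet today "trust_net")]

-- ===== PORT B =====
-- 'b is None or d > b'
def pvIsAbove : Option String → String → Bool
  | none, _ => true
  | some b, d => decide (b < d)

def compute_chip_day_py_alt (inst_data : List (String × List (String × Int))) (date_str : String) : List (String × Int) :=
  let D := PySem.Dict.ofList inst_data
  let target := PySem.Str.replace date_str "-" ""
  let bs := (PySem.Dict.items D).foldl (fun (acc : Option String × Option String) kv =>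
      if decide (target < kv.1) then acc
      else ((if decide (pvRecNet kv.2 "foreign_net" ≤ 0) && pvIsAbove acc.1 kv.1 then some kv.1 else acc.1),
            (if decide (pvRecNet kv.2 "trust_net" ≤ 0) && pvIsAbove acc.2 kv.1 then some kv.1 else acc.2)))
      (none, none)
  let cnt := (PySem.Dict.keys D).foldl (fun (acc : Int × Int) d =>
      if decide (target < d) then acc
      else (acc.1 + (if pvIsAbove bs.1 d then 1 else 0), acc.2 + (if pvIsAbove bs.2 d then 1 else 0)))
      ((0 : Int), (0 : Int))
  let today := PySem.Dict.getD D target []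
  [("foreign_consec_buy", cnt.1), ("trust_consec_buy", cnt.2),
   ("foreign_net", pvRecNet today "foreign_net"), ("trust_net", pvRecNet today "trust_net")]

-- ===== PRECONDITION & SPEC =====
def Spec_compute_chip_day_py (inst_data : List (String × List (String × Int))) (date_str : String) (out : List (String × Int)) : Prop := out = compute_chip_day_py_alt inst_data date_str
instance (inst_data : List (String × List (String × Int))) (date_str : String) (out : List (String × Int)) : Decidable (Spec_compute_chip_day_py inst_data date_str out) := by unfold Spec_compute_chip_day_py; infer_instance

-- ===== CLAIM (what is proved, stated in full; the proofs are below) =====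
def Claim_equal_compute_chip_day_py : Prop := ∀ (inst_data : List (String × List (String × Int))) (date_str : String), Dom_compute_chip_day_py inst_data date_str → Spec_compute_chip_day_py inst_data date_str (compute_chip_day_py inst_data date_str)

-- ===== LEMMAS AND PROOFS =====

-- B's blocker fold: 'is above the fold result' = 'above acc and above every kept bad date'
theorem pvBlockerFold_above (target : String) (bad : String → Bool) (L : List String)
    (acc : Option String) (x : String) :
    pvIsAbove (L.foldl (fun b d => if decide (target < d) then b
        else if bad d && pvIsAbove b d then some d else b) acc) x
      = (pvIsAbove acc x &&
         (L.filter (fun d => decide (d ≤ target) && bad d)).all (fun y => decide (y < x))) := by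
  induction L generalizing acc with
  | nil => simp
  | cons d rest ih =>
    simp only [List.foldl_cons, List.filter_cons]
    by_cases hlt : target < d
    · have hdt : decide (d ≤ target) = false := decide_eq_false (not_le.mpr hlt)
      have h1 : ¬ ((decide (d ≤ target) && bad d) = true) := by rw [hdt]; simp
      rw [if_pos (decide_eq_true hlt), if_neg h1]
      exact ih acc
    · have h1 : decide (d ≤ target) = true := decide_eq_true (not_lt.mp hlt)
      have hlt' : ¬ (decide (target < d) = true) := by rw [decide_eq_false hlt]; simp
      rw [if_neg hlt']
      by_cases hb : bad d = true
      · have hfilt : (decide (d ≤ target) && bad d) = true := by rw [h1, hb]; rfl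
        rw [if_pos hfilt, List.all_cons]
        by_cases ha : pvIsAbove acc d = true
        · rw [if_pos (by rw [hb, ha]; rfl : (bad d && pvIsAbove acc d) = true), ih (some d)]
          have hs : pvIsAbove (some d) x = decide (d < x) := rfl
          rw [hs]
          cases hdx : decide (d < x) with
          | false => simp only [Bool.false_and, Bool.and_false]
          | true =>
            have hdx' : d < x := of_decide_eq_true hdx
            have hax : pvIsAbove acc x = true := by
              cases acc with
              | none => rfl
              | some b =>
                have hbd : b < d := of_decide_eq_true ha
                exact decide_eq_true (lt_trans hbd hdx')
            rw [hax]
            simp only [Bool.true_and]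
        · rw [if_neg (fun h => ha (Bool.and_eq_true_iff.mp h).2), ih acc]
          cases acc with
          | none => exact absurd rfl ha
          | some b =>
            have hdb : ¬ b < d := fun h => ha (decide_eq_true h)
            cases hbx : decide (b < x) with
            | false =>
              have hsx : pvIsAbove (some b) x = false := hbx
              rw [hsx]
              simp only [Bool.false_and]
            | true =>
              have hdx : d < x := lt_of_le_of_lt (not_lt.mp hdb) (of_decide_eq_true hbx)
              rw [decide_eq_true hdx]
              simp only [Bool.true_and]
      · have hb' : bad d = false := by simpa using hb
        rw [if_neg (fun h => hb (Bool.and_eq_true_iff.mp h).1),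
            if_neg (fun h => hb (Bool.and_eq_true_iff.mp h).2)]
        exact ih acc

-- B's counting fold = countP over the kept dates
theorem pvCountFold (target : String) (bf bt : Option String) (L : List String) (a b : Int) :
    L.foldl (fun (acc : Int × Int) d =>
        if decide (target < d) then acc
        else (acc.1 + (if pvIsAbove bf d then 1 else 0), acc.2 + (if pvIsAbove bt d then 1 else 0)))
      (a, b)
      = (a + ((L.filter (fun d => decide (d ≤ target))).countP (fun d => pvIsAbove bf d) : Int),
         b + ((L.filter (fun d => decide (d ≤ target))).countP (fun d => pvIsAbove bt d) : Int)) := by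
  induction L generalizing a b with
  | nil => simp
  | cons d rest ih =>
    simp only [List.foldl_cons, List.filter_cons]
    by_cases hlt : target < d
    · have h1 : ¬ (decide (d ≤ target) = true) := by rw [decide_eq_false (not_le.mpr hlt)]; simp
      rw [if_pos (decide_eq_true hlt), if_neg h1]
      exact ih a b
    · have h1 : decide (d ≤ target) = true := decide_eq_true (not_lt.mp hlt)
      have hlt' : ¬ (decide (target < d) = true) := by rw [decide_eq_false hlt]; simp
      rw [if_neg hlt', if_pos h1, ih]
      rw [List.countP_cons, List.countP_cons]
      cases hf : pvIsAbove bf d <;> cases ht : pvIsAbove bt d <;>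
        · simp [Prod.ext_iff] <;> omega

-- A's take-while count on a strictly descending list = count of elements above all bad ones
theorem pvConsec_eq_countP (p : String → Bool) (L : List String)
    (hL : L.Pairwise (fun a b => b < a)) :
    pvConsec p L
      = ((L.countP (fun x => (L.filter (fun y => !p y)).all (fun y => decide (y < x)))) : Int) := by
  induction L with
  | nil => simp [pvConsec]
  | cons x r ih =>
    have hx : ∀ y ∈ r, y < x := fun y hy => (List.pairwise_cons.mp hL).1 y hy
    have hr := (List.pairwise_cons.mp hL).2
    by_cases hp : p x = true
    · have hfilter : (x :: r).filter (fun y => !p y) = r.filter (fun y => !p y) := by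
        simp [hp]
      rw [pvConsec, if_pos hp, ih hr, hfilter, List.countP_cons]
      have hpredx : ((r.filter (fun y => !p y)).all (fun y => decide (y < x))) = true := by
        simp only [List.all_eq_true]
        intro y hy
        exact decide_eq_true (hx y (List.mem_of_mem_filter hy))
      rw [if_pos hpredx]
      push_cast; ring
    · have hp' : p x = false := by simpa using hp
      rw [pvConsec, if_neg (by simp [hp'])]
      have hzero : (x :: r).countP
          (fun z => ((x :: r).filter (fun y => !p y)).all (fun y => decide (y < z))) = 0 := by
        rw [List.countP_eq_zero]
        intro z hz
        have hxmem : x ∈ (x :: r).filter (fun y => !p y) := by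
          simp [hp']
        intro hall
        have hxz : x < z := of_decide_eq_true ((List.all_eq_true.mp hall) x hxmem)
        rcases List.mem_cons.mp hz with rfl | hzr
        · exact lt_irrefl _ hxz
        · exact absurd hxz (not_lt.mpr (le_of_lt (hx z hzr)))
      rw [hzero]
      simp

-- proof-only abbreviations
def pvBad (D : PySem.Dict String (List (String × Int))) (field d : String) : Bool :=
  decide (pvRecNet (PySem.Dict.getD D d []) field ≤ 0)

def pvCount (inst_data : List (String × List (String × Int))) (target field : String) : Int :=
  (((PySem.Dict.keys (PySem.Dict.ofList inst_data)).filter (fun d => decide (d ≤ target))).countP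
    (fun x => ((PySem.Dict.keys (PySem.Dict.ofList inst_data)).filter
        (fun d => decide (d ≤ target) && pvBad (PySem.Dict.ofList inst_data) field d)).all
      (fun y => decide (y < x))) : Int)

-- B in closed form: counts are countP over the kept dates of 'above every kept bad date'
theorem alt_form (inst_data : List (String × List (String × Int))) (date_str : String) :
    compute_chip_day_py_alt inst_data date_str =
      [("foreign_consec_buy", pvCount inst_data (PySem.Str.replace date_str "-" "") "foreign_net"),
       ("trust_consec_buy", pvCount inst_data (PySem.Str.replace date_str "-" "") "trust_net"),
       ("foreign_net", pvRecNet (PySem.Dict.getD (PySem.Dict.ofList inst_data)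
           (PySem.Str.replace date_str "-" "") []) "foreign_net"),
       ("trust_net", pvRecNet (PySem.Dict.getD (PySem.Dict.ofList inst_data)
           (PySem.Str.replace date_str "-" "") []) "trust_net")] := by
  have hnd : (PySem.Dict.keys (PySem.Dict.ofList inst_data)).Nodup :=
    PySem.Dict.nodup_keys_ofList inst_data
  simp only [compute_chip_day_py_alt]
  -- names
  set D := PySem.Dict.ofList inst_data with hD
  set target := PySem.Str.replace date_str "-" "" with htarget
  -- 1. the blocker fold is a pair of independent folds over the items
  have hsplit :
      (PySem.Dict.items D).foldl (fun (acc : Option String × Option String) kv =>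
          if decide (target < kv.1) then acc
          else ((if decide (pvRecNet kv.2 "foreign_net" ≤ 0) && pvIsAbove acc.1 kv.1 then some kv.1 else acc.1),
                (if decide (pvRecNet kv.2 "trust_net" ≤ 0) && pvIsAbove acc.2 kv.1 then some kv.1 else acc.2)))
        (none, none)
      = ((PySem.Dict.items D).foldl (fun (b : Option String) kv =>
            if decide (target < kv.1) then b
            else if decide (pvRecNet kv.2 "foreign_net" ≤ 0) && pvIsAbove b kv.1 then some kv.1 else b) none,
         (PySem.Dict.items D).foldl (fun (b : Option String) kv =>
            if decide (target < kv.1) then b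
            else if decide (pvRecNet kv.2 "trust_net" ≤ 0) && pvIsAbove b kv.1 then some kv.1 else b) none) := by
    rw [show (fun (acc : Option String × Option String) kv =>
          if decide (target < kv.1) then acc
          else ((if decide (pvRecNet kv.2 "foreign_net" ≤ 0) && pvIsAbove acc.1 kv.1 then some kv.1 else acc.1),
                (if decide (pvRecNet kv.2 "trust_net" ≤ 0) && pvIsAbove acc.2 kv.1 then some kv.1 else acc.2)))
        = (fun (acc : Option String × Option String) kv =>
            ((fun (b : Option String) (kv : String × List (String × Int)) =>
                if decide (target < kv.1) then b
                else if decide (pvRecNet kv.2 "foreign_net" ≤ 0) && pvIsAbove b kv.1 then some kv.1 else b) acc.1 kv,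
             (fun (b : Option String) (kv : String × List (String × Int)) =>
                if decide (target < kv.1) then b
                else if decide (pvRecNet kv.2 "trust_net" ≤ 0) && pvIsAbove b kv.1 then some kv.1 else b) acc.2 kv))
        from by
          funext acc kv
          by_cases h : decide (target < kv.1) = true
          · simp only [if_pos h]
          · simp only [if_neg h]]
    rw [PySem.List.foldl_prod_mk
      (f := fun (b : Option String) (kv : String × List (String × Int)) =>
        if decide (target < kv.1) then b
        else if decide (pvRecNet kv.2 "foreign_net" ≤ 0) && pvIsAbove b kv.1 then some kv.1 else b)
      (g := fun (b : Option String) (kv : String × List (String × Int)) =>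
        if decide (target < kv.1) then b
        else if decide (pvRecNet kv.2 "trust_net" ≤ 0) && pvIsAbove b kv.1 then some kv.1 else b)]
  rw [hsplit]
  -- 2. each item fold only reads the key: move it to a fold over the keys
  have hitems : ∀ (field : String),
      (PySem.Dict.items D).foldl (fun (b : Option String) kv =>
          if decide (target < kv.1) then b
          else if decide (pvRecNet kv.2 field ≤ 0) && pvIsAbove b kv.1 then some kv.1 else b) none
      = (PySem.Dict.keys D).foldl (fun (b : Option String) d =>
          if decide (target < d) then b
          else if pvBad D field d && pvIsAbove b d then some d else b) none := by
    intro field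
    have h1 := PySem.List.foldl_congr_mem
      (l := PySem.Dict.items D) (init := (none : Option String))
      (f := fun (b : Option String) (kv : String × List (String × Int)) =>
        if decide (target < kv.1) then b
        else if decide (pvRecNet kv.2 field ≤ 0) && pvIsAbove b kv.1 then some kv.1 else b)
      (g := fun (b : Option String) (kv : String × List (String × Int)) =>
        if decide (target < kv.1) then b
        else if pvBad D field kv.1 && pvIsAbove b kv.1 then some kv.1 else b)
      (by
        intro b kv hkv
        have hv : PySem.Dict.getD D kv.1 [] = kv.2 := by
          obtain ⟨k, v⟩ := kv
          exact PySem.Dict.getD_of_mem_items D hkv hnd []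
        simp only [pvBad, hv])
    rw [h1, show (PySem.Dict.keys D) = (PySem.Dict.items D).map Prod.fst from rfl, List.foldl_map]
  rw [hitems "foreign_net", hitems "trust_net"]
  -- 3. the counting fold
  rw [pvCountFold]
  -- 4. the blocker fold characterisation, under countP
  have hcnt : ∀ (field : String),
      ((PySem.Dict.keys D).filter (fun d => decide (d ≤ target))).countP
        (fun d => pvIsAbove ((PySem.Dict.keys D).foldl (fun (b : Option String) d =>
            if decide (target < d) then b
            else if pvBad D field d && pvIsAbove b d then some d else b) none) d)
      = ((PySem.Dict.keys D).filter (fun d => decide (d ≤ target))).countP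
        (fun x => ((PySem.Dict.keys D).filter
            (fun d => decide (d ≤ target) && pvBad D field d)).all (fun y => decide (y < x))) := by
    intro field
    refine List.countP_congr ?_
    intro x _
    rw [pvBlockerFold_above target (pvBad D field) (PySem.Dict.keys D) none x]
    simp only [pvIsAbove, Bool.true_and]
  rw [hcnt "foreign_net", hcnt "trust_net"]
  simp only [pvCount, zero_add, ← hD]

-- A's branch-free shape on the main path
theorem pvConsec_eq_pvCount (inst_data : List (String × List (String × Int)))
    (target field : String) :
    pvConsec (fun d => decide (0 < pvRecNet (PySem.Dict.getD (PySem.Dict.ofList inst_data) d []) field))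
        (PySem.List.sorted ((PySem.Dict.keys (PySem.Dict.ofList inst_data)).filter
          (fun d => decide (d ≤ target))) (fun x => x) false).reverse
      = pvCount inst_data target field := by
  have hnd : (PySem.Dict.keys (PySem.Dict.ofList inst_data)).Nodup :=
    PySem.Dict.nodup_keys_ofList inst_data
  set D := PySem.Dict.ofList inst_data with hD
  set S := (PySem.Dict.keys D).filter (fun d => decide (d ≤ target)) with hS
  set L := (PySem.List.sorted S (fun x => x) false).reverse with hL
  have hSnd : S.Nodup := hnd.filter _
  have hperm : (PySem.List.sorted S (fun x => x) false).Perm S :=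
    PySem.List.sorted_perm S (fun x => x) false
  have hLperm : L.Perm S := (List.reverse_perm _).trans hperm
  have hpair : L.Pairwise (fun a b => b < a) := by
    have h1 : (PySem.List.sorted S (fun x => x) false).Pairwise (fun a b => a ≤ b) :=
      PySem.List.sorted_pairwise S (fun x => x)
    have h2 : (PySem.List.sorted S (fun x => x) false).Nodup := (hperm.nodup_iff).mpr hSnd
    have h3 : (PySem.List.sorted S (fun x => x) false).Pairwise (fun a b => a < b) :=
      (h1.and h2).imp (fun h => lt_of_le_of_ne h.1 h.2)
    exact (List.pairwise_reverse).mpr h3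
  rw [pvConsec_eq_countP _ _ hpair]
  have hbad : ∀ y : String,
      (!(decide (0 < pvRecNet (PySem.Dict.getD D y []) field))) = pvBad D field y := by
    intro y
    rw [pvBad, ← decide_not]
    exact decide_eq_decide.mpr not_lt
  have hfilt : (PySem.Dict.keys D).filter (fun d => decide (d ≤ target) && pvBad D field d)
      = S.filter (pvBad D field) := by
    rw [hS, List.filter_filter]
    refine List.filter_congr ?_
    intro x _
    exact Bool.and_comm _ _
  have hLfilt : (L.filter (fun y => !(decide (0 < pvRecNet (PySem.Dict.getD D y []) field)))).Perm
      (S.filter (pvBad D field)) := by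
    have := hLperm.filter (fun y => !(decide (0 < pvRecNet (PySem.Dict.getD D y []) field)))
    refine this.trans ?_
    rw [List.filter_congr (fun x _ => hbad x)]
  rw [pvCount, ← hD, hfilt]
  congr 1
  rw [hLperm.countP_eq]
  refine List.countP_congr ?_
  intro x _
  rw [List.Perm.all_eq hLfilt (f := fun y => decide (y < x))]

-- ===== VERDICT (by name: the statement is the Claim_ definition above) =====
theorem compute_chip_day_py_spec : Claim_equal_compute_chip_day_py := by
  intro inst_data date_str _
  unfold Spec_compute_chip_day_py
  rw [alt_form]
  unfold compute_chip_day_py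
  by_cases hnil : inst_data = []
  · subst hnil
    rfl
  · rw [if_neg hnil]
    simp only []
    by_cases hs : PySem.List.sorted ((PySem.Dict.keys (PySem.Dict.ofList inst_data)).filter
        (fun d => decide (d ≤ PySem.Str.replace date_str "-" ""))) (fun x => x) false = []
    · rw [if_pos hs]
      -- no admissible date: every count is 0 and the target is absent
      have hSnil : (PySem.Dict.keys (PySem.Dict.ofList inst_data)).filter
          (fun d => decide (d ≤ PySem.Str.replace date_str "-" "")) = [] :=
        (PySem.List.sorted_eq_nil_iff _ _ _).mp hs
      have hnotmem : PySem.Str.replace date_str "-" "" ∉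
          PySem.Dict.keys (PySem.Dict.ofList inst_data) := by
        intro hmem
        have : PySem.Str.replace date_str "-" "" ∈
            (PySem.Dict.keys (PySem.Dict.ofList inst_data)).filter
              (fun d => decide (d ≤ PySem.Str.replace date_str "-" "")) := by
          rw [List.mem_filter]
          exact ⟨hmem, by simp⟩
        rw [hSnil] at this
        exact absurd this (List.not_mem_nil)
      have hget : PySem.Dict.getD (PySem.Dict.ofList inst_data)
          (PySem.Str.replace date_str "-" "") [] = [] := by
        refine PySem.Dict.getD_of_not_contains (PySem.Dict.ofList inst_data) [] ?_
        rw [← Bool.not_eq_true]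
        intro hc
        exact hnotmem ((PySem.Dict.contains_iff_mem_keys (PySem.Dict.ofList inst_data) _).mp hc)
      have hcount : ∀ field, pvCount inst_data (PySem.Str.replace date_str "-" "") field = 0 := by
        intro field
        rw [pvCount, hSnil]
        rfl
      rw [hget, hcount, hcount]
      rfl
    · rw [if_neg hs]
      simp only [pvConsec_eq_pvCount]
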